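-- pv_equiv track=rewrite | github.com/fatma-elsafoury/twitter-pos-geotagging | twitter_pos/python/ner/extractEntities2.py | extract_similar_nouns_from_tweets
-- ===== SOURCE A (Python) =====
-- def extract_similar_nouns_from_tweets(arr_nouns,arr_locations):
--         extracted_locations={}
--         locations={}
--         x=0
--         for i in range(len(arr_nouns)):
--                 strNoun=arr_nouns[i]
--                 strNoun=strNoun.lower()
--                 for j in range(len(arr_locations)):
--                         strLoc=arr_locations[j]
--                         if strLoc==strNoun:
--                                 extracted_locations[x]=strNoun
--                                 x+=1
--
--         for k,v in extracted_locations.items():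
--                 if v !='rd' and v !='ln' and v !='cnr' and v != 'road' and v !='lane' and v != 'corner' and v != 'pl' and v != 'place':
--                         if v not in locations.values():
--                                 locations[k]=v
--                 else:
--                       locations[k]=v
--
--         return locations
-- ===== SOURCE B (Python) =====
-- _STOP = {'rd', 'ln', 'cnr', 'road', 'lane', 'corner', 'pl', 'place'}
--
--
-- def extract_similar_nouns_from_tweets(arr_nouns, arr_locations):
--     locations = {}
--     seen = set()
--     x = 0
--     for noun in arr_nouns:
--         n = noun.lower()
--         for loc in arr_locations:
--             if loc == n:
--                 if n in _STOP:
--                     locations[x] = n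
--                 elif n not in seen:
--                     locations[x] = n
--                     seen.add(n)
--                 x += 1
--     return locations
-- ===== Notes on version B (the rewrite author's own statement) =====
-- stated objective: simpler
-- what changed: B fuses A's two passes (build an intermediate extracted_locations dict, then re-scan it deduplicating by value) into a single online pass that records matches and deduplicates non-stopword values with a seen-set as it goes, eliminating the intermediate dict and the repeated 'v in locations.values()' linear scans.
import Mathlib
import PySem

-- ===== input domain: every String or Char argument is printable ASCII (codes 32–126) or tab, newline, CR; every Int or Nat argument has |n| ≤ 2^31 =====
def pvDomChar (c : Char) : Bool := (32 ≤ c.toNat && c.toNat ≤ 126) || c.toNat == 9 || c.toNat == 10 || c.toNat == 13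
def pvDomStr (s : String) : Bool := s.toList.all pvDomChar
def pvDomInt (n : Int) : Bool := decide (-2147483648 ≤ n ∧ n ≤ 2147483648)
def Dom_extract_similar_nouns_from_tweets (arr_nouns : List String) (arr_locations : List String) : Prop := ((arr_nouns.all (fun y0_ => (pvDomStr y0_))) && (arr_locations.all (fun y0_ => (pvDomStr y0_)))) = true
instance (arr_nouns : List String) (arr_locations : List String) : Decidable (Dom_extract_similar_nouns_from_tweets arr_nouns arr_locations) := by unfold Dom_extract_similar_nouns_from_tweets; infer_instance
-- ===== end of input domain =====

-- B fuses A's two passes into one: matching and dedup-by-value happen online with a seen-set,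
-- eliminating the intermediate extracted_locations dict and the second scan (objective: simpler).

-- ===== PORT A =====
def extract_similar_nouns_from_tweets (arr_nouns : List String) (arr_locations : List String) : List (Int × String) :=
  let st :=
    (PySem.List.pyRange 0 (arr_nouns.length : Int) 1).foldl
      (fun (st : PySem.Dict Int String × Int) i =>
        let strNoun := PySem.List.pyGetD arr_nouns i ""
        let strNoun' := PySem.Str.lower strNoun
        (PySem.List.pyRange 0 (arr_locations.length : Int) 1).foldl
          (fun (st : PySem.Dict Int String × Int) j =>
            let strLoc := PySem.List.pyGetD arr_locations j ""
            if strLoc == strNoun' then (st.1.insert st.2 strNoun', st.2 + 1) else st)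
          st)
      (PySem.Dict.empty, (0 : Int))
  let locations :=
    st.1.items.foldl
      (fun (locations : PySem.Dict Int String) kv =>
        if kv.2 != "rd" && kv.2 != "ln" && kv.2 != "cnr" && kv.2 != "road" && kv.2 != "lane" && kv.2 != "corner" && kv.2 != "pl" && kv.2 != "place" then
          if !(locations.values.contains kv.2) then locations.insert kv.1 kv.2 else locations
        else locations.insert kv.1 kv.2)
      PySem.Dict.empty
  locations.items

-- ===== PORT B =====
-- helper: the stopword set literal of Source B
def pvSTOP : PySem.Set String := PySem.Set.ofList ["rd", "ln", "cnr", "road", "lane", "corner", "pl", "place"]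

def extract_similar_nouns_from_tweets_alt (arr_nouns : List String) (arr_locations : List String) : List (Int × String) :=
  let st := arr_nouns.foldl
    (fun (st : PySem.Dict Int String × PySem.Set String × Int) noun =>
      let n := PySem.Str.lower noun
      arr_locations.foldl
        (fun (st : PySem.Dict Int String × PySem.Set String × Int) loc =>
          if loc == n then
            if PySem.Set.contains pvSTOP n then (st.1.insert st.2.2 n, st.2.1, st.2.2 + 1)
            else if !(PySem.Set.contains st.2.1 n) then (st.1.insert st.2.2 n, PySem.Set.add st.2.1 n, st.2.2 + 1)
            else (st.1, st.2.1, st.2.2 + 1)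
          else st)
        st)
    (PySem.Dict.empty, PySem.Set.empty, (0 : Int))
  st.1.items

-- ===== PRECONDITION & SPEC =====
def Spec_extract_similar_nouns_from_tweets (arr_nouns : List String) (arr_locations : List String) (out : List (Int × String)) : Prop := out = extract_similar_nouns_from_tweets_alt arr_nouns arr_locations
instance (arr_nouns : List String) (arr_locations : List String) (out : List (Int × String)) : Decidable (Spec_extract_similar_nouns_from_tweets arr_nouns arr_locations out) := by unfold Spec_extract_similar_nouns_from_tweets; infer_instance

-- ===== CLAIM (what is proved, stated in full; the proofs are below) =====
def Claim_equal_extract_similar_nouns_from_tweets : Prop := ∀ (arr_nouns : List String) (arr_locations : List String), Dom_extract_similar_nouns_from_tweets arr_nouns arr_locations → Spec_extract_similar_nouns_from_tweets arr_nouns arr_locations (extract_similar_nouns_from_tweets arr_nouns arr_locations)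

-- ===== LEMMAS AND PROOFS =====

-- pure (dict-free) models of the loops
def pvStepI (n : String) (st : List (Int × String) × Int) (loc : String) : List (Int × String) × Int :=
  if loc == n then (st.1 ++ [(st.2, n)], st.2 + 1) else st

def pvInnerA (locs : List String) (n : String) (st : List (Int × String) × Int) : List (Int × String) × Int :=
  locs.foldl (pvStepI n) st

def pvPhase1 (nouns locs : List String) (st : List (Int × String) × Int) : List (Int × String) × Int :=
  nouns.foldl (fun st noun => pvInnerA locs (PySem.Str.lower noun) st) st

def pvG2 (out : List (Int × String)) (kv : Int × String) : List (Int × String) :=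
  if !(PySem.Set.contains pvSTOP kv.2) then
    (if !((out.map Prod.snd).contains kv.2) then out ++ [kv] else out)
  else out ++ [kv]

def pvStepB (n : String) (st : List (Int × String) × PySem.Set String × Int) (loc : String) :
    List (Int × String) × PySem.Set String × Int :=
  if loc == n then
    if PySem.Set.contains pvSTOP n then (st.1 ++ [(st.2.2, n)], st.2.1, st.2.2 + 1)
    else if !(PySem.Set.contains st.2.1 n) then (st.1 ++ [(st.2.2, n)], PySem.Set.add st.2.1 n, st.2.2 + 1)
    else (st.1, st.2.1, st.2.2 + 1)
  else st

def pvInnerB (locs : List String) (n : String) (st : List (Int × String) × PySem.Set String × Int) :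
    List (Int × String) × PySem.Set String × Int :=
  locs.foldl (pvStepB n) st

def pvPhaseB (nouns locs : List String) (st : List (Int × String) × PySem.Set String × Int) :
    List (Int × String) × PySem.Set String × Int :=
  nouns.foldl (fun st noun => pvInnerB locs (PySem.Str.lower noun) st) st

-- the dict-level steps of the two ports
def pvDStepI (n : String) (st : PySem.Dict Int String × Int) (loc : String) : PySem.Dict Int String × Int :=
  if loc == n then (st.1.insert st.2 n, st.2 + 1) else st

def pvDStepB (n : String) (st : PySem.Dict Int String × PySem.Set String × Int) (loc : String) :
    PySem.Dict Int String × PySem.Set String × Int :=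
  if loc == n then
    if PySem.Set.contains pvSTOP n then (st.1.insert st.2.2 n, st.2.1, st.2.2 + 1)
    else if !(PySem.Set.contains st.2.1 n) then (st.1.insert st.2.2 n, PySem.Set.add st.2.1 n, st.2.2 + 1)
    else (st.1, st.2.1, st.2.2 + 1)
  else st

def pvDG2 (locations : PySem.Dict Int String) (kv : Int × String) : PySem.Dict Int String :=
  if kv.2 != "rd" && kv.2 != "ln" && kv.2 != "cnr" && kv.2 != "road" && kv.2 != "lane" && kv.2 != "corner" && kv.2 != "pl" && kv.2 != "place" then
    if !(locations.values.contains kv.2) then locations.insert kv.1 kv.2 else locations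
  else locations.insert kv.1 kv.2

-- the seen-set invariant: seen holds exactly the non-stopword values recorded so far
def pvInv (out : List (Int × String)) (seen : PySem.Set String) : Prop :=
  ∀ v, v ∉ pvSTOP → (v ∈ seen ↔ v ∈ out.map Prod.snd)

lemma pvInnerA_cons (l : String) (ls : List String) (n : String) (st : List (Int × String) × Int) :
    pvInnerA (l :: ls) n st = pvInnerA ls n (pvStepI n st l) := rfl

lemma pvInnerB_cons (l : String) (ls : List String) (n : String)
    (st : List (Int × String) × PySem.Set String × Int) :
    pvInnerB (l :: ls) n st = pvInnerB ls n (pvStepB n st l) := rfl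

lemma pvPhase1_cons (noun : String) (rest locs : List String) (st : List (Int × String) × Int) :
    pvPhase1 (noun :: rest) locs st = pvPhase1 rest locs (pvInnerA locs (PySem.Str.lower noun) st) := rfl

lemma pvPhaseB_cons (noun : String) (rest locs : List String)
    (st : List (Int × String) × PySem.Set String × Int) :
    pvPhaseB (noun :: rest) locs st = pvPhaseB rest locs (pvInnerB locs (PySem.Str.lower noun) st) := rfl

lemma pv_values_eq (d : PySem.Dict Int String) : d.values = d.items.map Prod.snd := by
  simp [PySem.Dict.values]

lemma pv_ne_decide (a b : String) : (a != b) = !decide (a = b) := by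
  by_cases h : a = b <;> simp [h]

lemma pv_stop_chain (v : String) :
    (v != "rd" && v != "ln" && v != "cnr" && v != "road" && v != "lane" && v != "corner" && v != "pl" && v != "place")
      = !(PySem.Set.contains pvSTOP v) := by
  simp only [pvSTOP, PySem.Set.contains, PySem.Set.ofList, PySem.Set.empty]
  simp [pv_ne_decide, Bool.and_assoc]

-- port A with its range loops rewritten to direct list folds
lemma pv_A_eq (arr_nouns arr_locations : List String) :
    extract_similar_nouns_from_tweets arr_nouns arr_locations =
      ((arr_nouns.foldl (fun st noun => arr_locations.foldl (pvDStepI (PySem.Str.lower noun)) st)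
          (PySem.Dict.empty, (0 : Int))).1.items.foldl pvDG2 PySem.Dict.empty).items := by
  unfold extract_similar_nouns_from_tweets
  rw [PySem.List.foldl_pyRange_zero_pyGetD' arr_nouns ""
    (fun (st : PySem.Dict Int String × Int) noun =>
      (PySem.List.pyRange 0 (arr_locations.length : Int) 1).foldl
        (fun (st : PySem.Dict Int String × Int) j =>
          let strLoc := PySem.List.pyGetD arr_locations j ""
          if strLoc == PySem.Str.lower noun then (st.1.insert st.2 (PySem.Str.lower noun), st.2 + 1) else st)
        st)
    (PySem.Dict.empty, (0 : Int))]
  have hstep : (fun (st : PySem.Dict Int String × Int) noun =>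
      (PySem.List.pyRange 0 (arr_locations.length : Int) 1).foldl
        (fun (st : PySem.Dict Int String × Int) j =>
          let strLoc := PySem.List.pyGetD arr_locations j ""
          if strLoc == PySem.Str.lower noun then (st.1.insert st.2 (PySem.Str.lower noun), st.2 + 1) else st)
        st)
      = (fun (st : PySem.Dict Int String × Int) noun =>
          arr_locations.foldl (pvDStepI (PySem.Str.lower noun)) st) := by
    funext st noun
    exact PySem.List.foldl_pyRange_zero_pyGetD' arr_locations "" (pvDStepI (PySem.Str.lower noun)) st
  rw [hstep]
  rfl

lemma pv_B_eq (arr_nouns arr_locations : List String) :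
    extract_similar_nouns_from_tweets_alt arr_nouns arr_locations =
      ((arr_nouns.foldl (fun st noun => arr_locations.foldl (pvDStepB (PySem.Str.lower noun)) st)
          (PySem.Dict.empty, PySem.Set.empty, (0 : Int))).1.items) := rfl

lemma pv_innerA_split (locs : List String) (n : String) (E F : List (Int × String)) (x : Int) :
    pvInnerA locs n (E ++ F, x) = (E ++ (pvInnerA locs n (F, x)).1, (pvInnerA locs n (F, x)).2) := by
  induction locs generalizing F x with
  | nil => simp [pvInnerA]
  | cons l ls ih =>
      rw [pvInnerA_cons, pvInnerA_cons]
      by_cases h : (l == n) = true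
      · have s1 : pvStepI n (E ++ F, x) l = (E ++ (F ++ [(x, n)]), x + 1) := by
          simp [pvStepI, h]
        have s2 : pvStepI n (F, x) l = (F ++ [(x, n)], x + 1) := by
          simp [pvStepI, h]
        rw [s1, s2]
        exact ih (F ++ [(x, n)]) (x + 1)
      · have h' : (l == n) = false := by revert h; cases l == n <;> simp
        have s1 : pvStepI n (E ++ F, x) l = (E ++ F, x) := by simp [pvStepI, h']
        have s2 : pvStepI n (F, x) l = (F, x) := by simp [pvStepI, h']
        rw [s1, s2]
        exact ih F x

lemma pv_phase1_split (nouns locs : List String) (E : List (Int × String)) (x : Int) :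
    pvPhase1 nouns locs (E, x) = (E ++ (pvPhase1 nouns locs ([], x)).1, (pvPhase1 nouns locs ([], x)).2) := by
  induction nouns generalizing E x with
  | nil => simp [pvPhase1]
  | cons noun rest ih =>
      rw [pvPhase1_cons, pvPhase1_cons]
      have h1 : pvInnerA locs (PySem.Str.lower noun) (E, x)
          = (E ++ (pvInnerA locs (PySem.Str.lower noun) ([], x)).1, (pvInnerA locs (PySem.Str.lower noun) ([], x)).2) := by
        simpa using pv_innerA_split locs (PySem.Str.lower noun) E [] x
      have h0 : pvInnerA locs (PySem.Str.lower noun) ([], x)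
          = ((pvInnerA locs (PySem.Str.lower noun) ([], x)).1, (pvInnerA locs (PySem.Str.lower noun) ([], x)).2) := rfl
      rw [h1, h0]
      have h2 := ih ((pvInnerA locs (PySem.Str.lower noun) ([], x)).1 : List (Int × String))
        ((pvInnerA locs (PySem.Str.lower noun) ([], x)).2)
      have h3 := ih (E ++ (pvInnerA locs (PySem.Str.lower noun) ([], x)).1)
        ((pvInnerA locs (PySem.Str.lower noun) ([], x)).2)
      rw [h2, h3]
      simp [List.append_assoc]

-- key invariant of the pure phase-1 fold: keys nonneg, strictly increasing, below the counter
def pvKeysOK (out : List (Int × String)) (x : Int) : Prop :=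
  (out.map Prod.fst).Pairwise (· < ·) ∧ (∀ p ∈ out, 0 ≤ p.1 ∧ p.1 < x) ∧ 0 ≤ x

lemma pv_innerA_keysOK (locs : List String) (n : String) (out : List (Int × String)) (x : Int)
    (h : pvKeysOK out x) :
    pvKeysOK (pvInnerA locs n (out, x)).1 (pvInnerA locs n (out, x)).2 ∧ x ≤ (pvInnerA locs n (out, x)).2 := by
  induction locs generalizing out x with
  | nil => exact ⟨h, le_refl x⟩
  | cons l ls ih =>
      rw [pvInnerA_cons]
      by_cases hl : (l == n) = true
      · have s1 : pvStepI n (out, x) l = (out ++ [(x, n)], x + 1) := by simp [pvStepI, hl]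
        rw [s1]
        obtain ⟨hpw, hbd, hx⟩ := h
        have h' : pvKeysOK (out ++ [(x, n)]) (x + 1) := by
          refine ⟨?_, ?_, by omega⟩
          · simp only [List.map_append, List.pairwise_append]
            refine ⟨hpw, by simp, ?_⟩
            intro a ha b hb
            simp only [List.map_cons, List.map_nil, List.mem_singleton] at hb
            subst hb
            simp only [List.mem_map] at ha
            obtain ⟨p, hp, rfl⟩ := ha
            exact (hbd p hp).2
          · intro p hp
            rcases List.mem_append.mp hp with h1 | h1
            · have := hbd p h1; omega
            · simp only [List.mem_singleton] at h1; subst h1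
              constructor
              · exact hx
              · omega
        have hrec := ih (out ++ [(x, n)]) (x + 1) h'
        exact ⟨hrec.1, le_trans (by omega : x ≤ x + 1) hrec.2⟩
      · have hl' : (l == n) = false := by revert hl; cases l == n <;> simp
        have s1 : pvStepI n (out, x) l = (out, x) := by simp [pvStepI, hl']
        rw [s1]
        exact ih out x h

lemma pv_phase1_keysOK (nouns locs : List String) (out : List (Int × String)) (x : Int)
    (h : pvKeysOK out x) :
    pvKeysOK (pvPhase1 nouns locs (out, x)).1 (pvPhase1 nouns locs (out, x)).2 := by
  induction nouns generalizing out x with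
  | nil => exact h
  | cons noun rest ih =>
      rw [pvPhase1_cons]
      have h1 := (pv_innerA_keysOK locs (PySem.Str.lower noun) out x h).1
      have h0 : pvInnerA locs (PySem.Str.lower noun) (out, x)
          = ((pvInnerA locs (PySem.Str.lower noun) (out, x)).1, (pvInnerA locs (PySem.Str.lower noun) (out, x)).2) := rfl
      rw [h0]
      exact ih _ _ h1

-- dict-level phase 1 computes the pure phase 1 (fresh keys always append)
lemma pv_dict1_sim (locs : List String) (n : String) (d : PySem.Dict Int String) (x : Int)
    (out : List (Int × String)) (hi : d.items = out) (hb : ∀ k, d.contains k = true → k < x) :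
    (locs.foldl (pvDStepI n) (d, x)).1.items = (pvInnerA locs n (out, x)).1
    ∧ (locs.foldl (pvDStepI n) (d, x)).2 = (pvInnerA locs n (out, x)).2
    ∧ (∀ k, (locs.foldl (pvDStepI n) (d, x)).1.contains k = true → k < (locs.foldl (pvDStepI n) (d, x)).2) := by
  induction locs generalizing d x out with
  | nil => exact ⟨hi, rfl, hb⟩
  | cons l ls ih =>
      rw [List.foldl_cons, pvInnerA_cons]
      by_cases hl : (l == n) = true
      · have s1 : pvDStepI n (d, x) l = (d.insert x n, x + 1) := by simp [pvDStepI, hl]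
        have s2 : pvStepI n (out, x) l = (out ++ [(x, n)], x + 1) := by simp [pvStepI, hl]
        rw [s1, s2]
        have hnc : d.contains x = false := by
          by_contra hc
          have hc' : d.contains x = true := by revert hc; cases d.contains x <;> simp
          have := hb x hc'; omega
        have hitems : (d.insert x n).items = out ++ [(x, n)] := by
          rw [PySem.Dict.items_insert_of_not_contains (h := hnc), hi]
        have hb' : ∀ k, (d.insert x n).contains k = true → k < x + 1 := by
          intro k hk
          rw [PySem.Dict.contains_insert] at hk
          rcases Bool.or_eq_true_iff.mp hk with h1 | h1
          · have : k = x := by simpa using h1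
            omega
          · have := hb k h1; omega
        exact ih (d.insert x n) (x + 1) (out ++ [(x, n)]) hitems hb'
      · have hl' : (l == n) = false := by revert hl; cases l == n <;> simp
        have s1 : pvDStepI n (d, x) l = (d, x) := by simp [pvDStepI, hl']
        have s2 : pvStepI n (out, x) l = (out, x) := by simp [pvStepI, hl']
        rw [s1, s2]
        exact ih d x out hi hb

lemma pv_dictPhase1_sim (nouns locs : List String) (d : PySem.Dict Int String) (x : Int)
    (out : List (Int × String)) (hi : d.items = out) (hb : ∀ k, d.contains k = true → k < x) :
    (nouns.foldl (fun st noun => locs.foldl (pvDStepI (PySem.Str.lower noun)) st) (d, x)).1.items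
      = (pvPhase1 nouns locs (out, x)).1
    ∧ (∀ k, (nouns.foldl (fun st noun => locs.foldl (pvDStepI (PySem.Str.lower noun)) st) (d, x)).1.contains k = true
        → k < (nouns.foldl (fun st noun => locs.foldl (pvDStepI (PySem.Str.lower noun)) st) (d, x)).2) := by
  induction nouns generalizing d x out with
  | nil => exact ⟨hi, hb⟩
  | cons noun rest ih =>
      rw [List.foldl_cons, pvPhase1_cons]
      obtain ⟨h1, h2, h3⟩ := pv_dict1_sim locs (PySem.Str.lower noun) d x out hi hb
      rw [h2] at h3
      have key := ih (locs.foldl (pvDStepI (PySem.Str.lower noun)) (d, x)).1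
        (pvInnerA locs (PySem.Str.lower noun) (out, x)).2
        (pvInnerA locs (PySem.Str.lower noun) (out, x)).1 h1 h3
      have e1 : ((locs.foldl (pvDStepI (PySem.Str.lower noun)) (d, x)).1,
                 (pvInnerA locs (PySem.Str.lower noun) (out, x)).2)
              = locs.foldl (pvDStepI (PySem.Str.lower noun)) (d, x) := by
        rw [← h2]
      rw [e1] at key
      exact key

-- dict-level phase B computes the pure phase B
lemma pv_dictB_sim (locs : List String) (n : String) (d : PySem.Dict Int String)
    (seen : PySem.Set String) (x : Int) (out : List (Int × String))
    (hi : d.items = out) (hb : ∀ k, d.contains k = true → k < x) :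
    (locs.foldl (pvDStepB n) (d, seen, x)).1.items = (pvInnerB locs n (out, seen, x)).1
    ∧ (locs.foldl (pvDStepB n) (d, seen, x)).2.1 = (pvInnerB locs n (out, seen, x)).2.1
    ∧ (locs.foldl (pvDStepB n) (d, seen, x)).2.2 = (pvInnerB locs n (out, seen, x)).2.2
    ∧ (∀ k, (locs.foldl (pvDStepB n) (d, seen, x)).1.contains k = true → k < (locs.foldl (pvDStepB n) (d, seen, x)).2.2) := by
  induction locs generalizing d seen x out with
  | nil => exact ⟨hi, rfl, rfl, hb⟩
  | cons l ls ih =>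
      rw [List.foldl_cons, pvInnerB_cons]
      have hnc : d.contains x = false := by
        by_contra hc
        have hc' : d.contains x = true := by revert hc; cases d.contains x <;> simp
        have := hb x hc'; omega
      have hitems : (d.insert x n).items = out ++ [(x, n)] := by
        rw [PySem.Dict.items_insert_of_not_contains (h := hnc), hi]
      have hb' : ∀ k, (d.insert x n).contains k = true → k < x + 1 := by
        intro k hk
        rw [PySem.Dict.contains_insert] at hk
        rcases Bool.or_eq_true_iff.mp hk with h1 | h1
        · have : k = x := by simpa using h1
          omega
        · have := hb k h1; omega
      have hbw : ∀ k, d.contains k = true → k < x + 1 := fun k hk => by have := hb k hk; omega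
      by_cases hl : (l == n) = true
      · by_cases hsm : n ∈ pvSTOP
        · have s1 : pvDStepB n (d, seen, x) l = (d.insert x n, seen, x + 1) := by
            simp [pvDStepB, hl, PySem.Set.contains, hsm]
          have s2 : pvStepB n (out, seen, x) l = (out ++ [(x, n)], seen, x + 1) := by
            simp [pvStepB, hl, PySem.Set.contains, hsm]
          rw [s1, s2]
          exact ih (d.insert x n) seen (x + 1) (out ++ [(x, n)]) hitems hb'
        · by_cases hseenm : n ∈ seen
          · have s1 : pvDStepB n (d, seen, x) l = (d, seen, x + 1) := by
              simp [pvDStepB, hl, PySem.Set.contains, hsm, hseenm]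
            have s2 : pvStepB n (out, seen, x) l = (out, seen, x + 1) := by
              simp [pvStepB, hl, PySem.Set.contains, hsm, hseenm]
            rw [s1, s2]
            exact ih d seen (x + 1) out hi hbw
          · have s1 : pvDStepB n (d, seen, x) l = (d.insert x n, PySem.Set.add seen n, x + 1) := by
              simp [pvDStepB, hl, PySem.Set.contains, hsm, hseenm]
            have s2 : pvStepB n (out, seen, x) l = (out ++ [(x, n)], PySem.Set.add seen n, x + 1) := by
              simp [pvStepB, hl, PySem.Set.contains, hsm, hseenm]
            rw [s1, s2]
            exact ih (d.insert x n) (PySem.Set.add seen n) (x + 1) (out ++ [(x, n)]) hitems hb'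
      · have hl' : (l == n) = false := by revert hl; cases l == n <;> simp
        have s1 : pvDStepB n (d, seen, x) l = (d, seen, x) := by simp [pvDStepB, hl']
        have s2 : pvStepB n (out, seen, x) l = (out, seen, x) := by simp [pvStepB, hl']
        rw [s1, s2]
        exact ih d seen x out hi hb

lemma pv_dictPhaseB_sim (nouns locs : List String) (d : PySem.Dict Int String)
    (seen : PySem.Set String) (x : Int) (out : List (Int × String))
    (hi : d.items = out) (hb : ∀ k, d.contains k = true → k < x) :
    (nouns.foldl (fun st noun => locs.foldl (pvDStepB (PySem.Str.lower noun)) st) (d, seen, x)).1.items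
      = (pvPhaseB nouns locs (out, seen, x)).1 := by
  induction nouns generalizing d seen x out with
  | nil => exact hi
  | cons noun rest ih =>
      rw [List.foldl_cons, pvPhaseB_cons]
      obtain ⟨h1, h2, h3, h4⟩ := pv_dictB_sim locs (PySem.Str.lower noun) d seen x out hi hb
      rw [h3] at h4
      have key := ih (locs.foldl (pvDStepB (PySem.Str.lower noun)) (d, seen, x)).1
        (pvInnerB locs (PySem.Str.lower noun) (out, seen, x)).2.1
        (pvInnerB locs (PySem.Str.lower noun) (out, seen, x)).2.2
        (pvInnerB locs (PySem.Str.lower noun) (out, seen, x)).1 h1 h4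
      have e1 : ((locs.foldl (pvDStepB (PySem.Str.lower noun)) (d, seen, x)).1,
                 (pvInnerB locs (PySem.Str.lower noun) (out, seen, x)).2.1,
                 (pvInnerB locs (PySem.Str.lower noun) (out, seen, x)).2.2)
              = locs.foldl (pvDStepB (PySem.Str.lower noun)) (d, seen, x) := by
        rw [← h2, ← h3]
      rw [e1] at key
      exact key

-- dict-level phase 2 computes the pure fold pvG2 (keys of E are fresh and increasing)
lemma pv_dict2_sim (E : List (Int × String)) (d : PySem.Dict Int String) (out : List (Int × String)) (y : Int)
    (hi : d.items = out) (hb : ∀ k, d.contains k = true → k < y)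
    (hlo : ∀ p ∈ E, y ≤ p.1) (hpw : (E.map Prod.fst).Pairwise (· < ·)) :
    (E.foldl pvDG2 d).items = E.foldl pvG2 out := by
  induction E generalizing d out y with
  | nil => exact hi
  | cons kv rest ih =>
      obtain ⟨k, v⟩ := kv
      rw [List.foldl_cons, List.foldl_cons]
      have hky : y ≤ k := by
        have := hlo (k, v) (by simp)
        simpa using this
      have hnc : d.contains k = false := by
        by_contra hc
        have hc' : d.contains k = true := by revert hc; cases d.contains k <;> simp
        have := hb k hc'; omega
      have hitems : (d.insert k v).items = out ++ [(k, v)] := by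
        rw [PySem.Dict.items_insert_of_not_contains (h := hnc), hi]
      have hb' : ∀ k', (d.insert k v).contains k' = true → k' < k + 1 := by
        intro k' hk
        rw [PySem.Dict.contains_insert] at hk
        rcases Bool.or_eq_true_iff.mp hk with h1 | h1
        · have : k' = k := by simpa using h1
          omega
        · have := hb k' h1; omega
      have hbw : ∀ k', d.contains k' = true → k' < k + 1 := by
        intro k' hk
        have := hb k' hk; omega
      have hlo' : ∀ p ∈ rest, k + 1 ≤ p.1 := by
        intro p hp
        have := (List.pairwise_cons.mp (by simpa using hpw)).1 p.1 (List.mem_map_of_mem hp)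
        omega
      have hpw' : (rest.map Prod.fst).Pairwise (· < ·) := (List.pairwise_cons.mp (by simpa using hpw)).2
      have hvals : d.values = out.map Prod.snd := by rw [pv_values_eq, hi]
      by_cases hsm : v ∈ pvSTOP
      · have hDG : pvDG2 d (k, v) = d.insert k v := by
          simp [pvDG2, pv_stop_chain, PySem.Set.contains, hsm]
        have hg2 : pvG2 out (k, v) = out ++ [(k, v)] := by
          simp [pvG2, PySem.Set.contains, hsm]
        rw [hDG, hg2]
        exact ih (d.insert k v) (out ++ [(k, v)]) (k + 1) hitems hb' hlo' hpw'
      · by_cases hmm : v ∈ out.map Prod.snd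
        · have hDG : pvDG2 d (k, v) = d := by
            simp [pvDG2, pv_stop_chain, PySem.Set.contains, hsm, hvals, hmm]
          have hg2 : pvG2 out (k, v) = out := by
            simp [pvG2, PySem.Set.contains, hsm, hmm]
          rw [hDG, hg2]
          exact ih d out (k + 1) hi hbw hlo' hpw'
        · have hDG : pvDG2 d (k, v) = d.insert k v := by
            simp [pvDG2, pv_stop_chain, PySem.Set.contains, hsm, hvals, hmm]
          have hg2 : pvG2 out (k, v) = out ++ [(k, v)] := by
            simp [pvG2, PySem.Set.contains, hsm, hmm]
          rw [hDG, hg2]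
          exact ih (d.insert k v) (out ++ [(k, v)]) (k + 1) hitems hb' hlo' hpw'

-- the fusion: running A's dedup pass over the pairs a noun produces = B's online step
lemma pv_inner_fuse (locs : List String) (n : String) (out : List (Int × String))
    (seen : PySem.Set String) (x : Int) (hinv : pvInv out seen) :
    (pvInnerA locs n ([], x)).1.foldl pvG2 out = (pvInnerB locs n (out, seen, x)).1
    ∧ pvInv (pvInnerB locs n (out, seen, x)).1 (pvInnerB locs n (out, seen, x)).2.1
    ∧ (pvInnerA locs n ([], x)).2 = (pvInnerB locs n (out, seen, x)).2.2 := by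
  induction locs generalizing out seen x with
  | nil => exact ⟨rfl, hinv, rfl⟩
  | cons l ls ih =>
      rw [pvInnerA_cons, pvInnerB_cons]
      by_cases hl : (l == n) = true
      · have sA : pvStepI n ([], x) l = ([(x, n)], x + 1) := by simp [pvStepI, hl]
        rw [sA]
        have hsplit : pvInnerA ls n ([(x, n)], x + 1)
            = ((x, n) :: (pvInnerA ls n ([], x + 1)).1, (pvInnerA ls n ([], x + 1)).2) := by
          simpa using pv_innerA_split ls n [(x, n)] [] (x + 1)
        rw [hsplit]
        by_cases hsm : n ∈ pvSTOP
        · have sB : pvStepB n (out, seen, x) l = (out ++ [(x, n)], seen, x + 1) := by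
            simp [pvStepB, hl, PySem.Set.contains, hsm]
          rw [sB]
          have hg : List.foldl pvG2 out ((x, n) :: (pvInnerA ls n ([], x + 1)).1)
              = List.foldl pvG2 (out ++ [(x, n)]) (pvInnerA ls n ([], x + 1)).1 := by
            rw [List.foldl_cons]
            congr 1
            simp [pvG2, PySem.Set.contains, hsm]
          rw [hg]
          have hinv' : pvInv (out ++ [(x, n)]) seen := by
            intro v hv
            have hvn : v ≠ n := by
              intro h; subst h; exact hv hsm
            simp only [List.map_append, List.mem_append]
            constructor
            · intro h; exact Or.inl ((hinv v hv).mp h)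
            · intro h
              rcases h with h | h
              · exact (hinv v hv).mpr h
              · simp at h; exact absurd h hvn
          exact ih (out ++ [(x, n)]) seen (x + 1) hinv'
        · by_cases hseenm : n ∈ seen
          · have sB : pvStepB n (out, seen, x) l = (out, seen, x + 1) := by
              simp [pvStepB, hl, PySem.Set.contains, hsm, hseenm]
            rw [sB]
            have hmem : n ∈ out.map Prod.snd := (hinv n hsm).mp hseenm
            have hg : List.foldl pvG2 out ((x, n) :: (pvInnerA ls n ([], x + 1)).1)
                = List.foldl pvG2 out (pvInnerA ls n ([], x + 1)).1 := by
              rw [List.foldl_cons]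
              congr 1
              simp [pvG2, PySem.Set.contains, hsm, hmem]
            rw [hg]
            exact ih out seen (x + 1) hinv
          · have sB : pvStepB n (out, seen, x) l = (out ++ [(x, n)], PySem.Set.add seen n, x + 1) := by
              simp [pvStepB, hl, PySem.Set.contains, hsm, hseenm]
            rw [sB]
            have hnm : n ∉ out.map Prod.snd := by
              intro h
              exact hseenm ((hinv n hsm).mpr h)
            have hg : List.foldl pvG2 out ((x, n) :: (pvInnerA ls n ([], x + 1)).1)
                = List.foldl pvG2 (out ++ [(x, n)]) (pvInnerA ls n ([], x + 1)).1 := by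
              rw [List.foldl_cons]
              congr 1
              simp [pvG2, PySem.Set.contains, hsm, hnm]
            rw [hg]
            have hinv' : pvInv (out ++ [(x, n)]) (PySem.Set.add seen n) := by
              intro v hv
              have hadd : v ∈ PySem.Set.add seen n ↔ v ∈ seen ∨ v = n := by simp [PySem.Set.mem_add]
              rw [hadd]
              simp only [List.map_append, List.mem_append]
              constructor
              · intro h
                rcases h with h | h
                · exact Or.inl ((hinv v hv).mp h)
                · subst h; right; simp
              · intro h
                rcases h with h | h
                · exact Or.inl ((hinv v hv).mpr h)
                · simp at h; right; exact h
            exact ih (out ++ [(x, n)]) (PySem.Set.add seen n) (x + 1) hinv'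
      · have hl' : (l == n) = false := by revert hl; cases l == n <;> simp
        have sA : pvStepI n ([], x) l = ([], x) := by simp [pvStepI, hl']
        have sB : pvStepB n (out, seen, x) l = (out, seen, x) := by simp [pvStepB, hl']
        rw [sA, sB]
        exact ih out seen x hinv

lemma pv_phase_fuse (nouns locs : List String) (out : List (Int × String))
    (seen : PySem.Set String) (x : Int) (hinv : pvInv out seen) :
    (pvPhase1 nouns locs ([], x)).1.foldl pvG2 out = (pvPhaseB nouns locs (out, seen, x)).1
    ∧ pvInv (pvPhaseB nouns locs (out, seen, x)).1 (pvPhaseB nouns locs (out, seen, x)).2.1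
    ∧ (pvPhase1 nouns locs ([], x)).2 = (pvPhaseB nouns locs (out, seen, x)).2.2 := by
  induction nouns generalizing out seen x with
  | nil => exact ⟨rfl, hinv, rfl⟩
  | cons noun rest ih =>
      rw [pvPhase1_cons, pvPhaseB_cons]
      obtain ⟨hf1, hf2, hf3⟩ := pv_inner_fuse locs (PySem.Str.lower noun) out seen x hinv
      have hsplit : pvPhase1 rest locs (pvInnerA locs (PySem.Str.lower noun) ([], x))
          = ((pvInnerA locs (PySem.Str.lower noun) ([], x)).1
              ++ (pvPhase1 rest locs ([], (pvInnerA locs (PySem.Str.lower noun) ([], x)).2)).1,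
             (pvPhase1 rest locs ([], (pvInnerA locs (PySem.Str.lower noun) ([], x)).2)).2) :=
        pv_phase1_split rest locs (pvInnerA locs (PySem.Str.lower noun) ([], x)).1
          (pvInnerA locs (PySem.Str.lower noun) ([], x)).2
      rw [hsplit]
      have key := ih (pvInnerB locs (PySem.Str.lower noun) (out, seen, x)).1
        (pvInnerB locs (PySem.Str.lower noun) (out, seen, x)).2.1
        (pvInnerB locs (PySem.Str.lower noun) (out, seen, x)).2.2 hf2
      have eB : ((pvInnerB locs (PySem.Str.lower noun) (out, seen, x)).1,
                 (pvInnerB locs (PySem.Str.lower noun) (out, seen, x)).2.1,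
                 (pvInnerB locs (PySem.Str.lower noun) (out, seen, x)).2.2)
              = pvInnerB locs (PySem.Str.lower noun) (out, seen, x) := rfl
      rw [eB] at key
      refine ⟨?_, key.2.1, ?_⟩
      · show List.foldl pvG2 out ((pvInnerA locs (PySem.Str.lower noun) ([], x)).1
            ++ (pvPhase1 rest locs ([], (pvInnerA locs (PySem.Str.lower noun) ([], x)).2)).1) = _
        rw [List.foldl_append, hf1, hf3]
        exact key.1
      · show (pvPhase1 rest locs ([], (pvInnerA locs (PySem.Str.lower noun) ([], x)).2)).2 = _
        rw [hf3]
        exact key.2.2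

-- ===== VERDICT (by name: the statement is the Claim_ definition above) =====
theorem extract_similar_nouns_from_tweets_spec : Claim_equal_extract_similar_nouns_from_tweets := by
  intro arr_nouns arr_locations _
  unfold Spec_extract_similar_nouns_from_tweets
  rw [pv_A_eq, pv_B_eq]
  obtain ⟨h1, h2⟩ := pv_dictPhase1_sim arr_nouns arr_locations PySem.Dict.empty 0 [] rfl
    (by intro k hk; simp [PySem.Dict.contains_empty] at hk)
  rw [h1]
  have hkeys : pvKeysOK (pvPhase1 arr_nouns arr_locations ([], 0)).1 (pvPhase1 arr_nouns arr_locations ([], 0)).2 :=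
    pv_phase1_keysOK arr_nouns arr_locations [] 0 ⟨by simp, by simp, le_refl 0⟩
  have hd2 := pv_dict2_sim (pvPhase1 arr_nouns arr_locations ([], 0)).1 PySem.Dict.empty [] 0 rfl
    (by intro k hk; simp [PySem.Dict.contains_empty] at hk)
    (fun p hp => (hkeys.2.1 p hp).1) hkeys.1
  rw [hd2]
  have hinv0 : pvInv [] PySem.Set.empty := by
    intro v _
    simp [PySem.Set.empty]
  obtain ⟨hfuse, _, _⟩ := pv_phase_fuse arr_nouns arr_locations [] PySem.Set.empty 0 hinv0
  rw [hfuse]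
  exact (pv_dictPhaseB_sim arr_nouns arr_locations PySem.Dict.empty PySem.Set.empty 0 [] rfl
    (by intro k hk; simp [PySem.Dict.contains_empty] at hk)).symm
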